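-- pv_equiv track=rewrite | github.com/CissyDuan/Evol | evol/intertextual/text_process.py | remove_multimark
-- ===== SOURCE A (Python) =====
-- conflict_mark='、,，。！？!?：:;'
--
-- def remove_multimark(text):
--     if text=='' or len(text)==1:
--         return text
--     else:
--         outtext=''
--         skip_flag=0
--         for i in range(len(text)-1):
--             if skip_flag==1:
--                 if text[i+1] not in conflict_mark:
--                     skip_flag=0
--                 continue
--
--             elif text[i] in conflict_mark and text[i+1] in conflict_mark:
--                 skip_flag=1
--             outtext+=text[i]
--         if skip_flag==0:
--             outtext+=text[-1]
--         return outtext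
-- ===== SOURCE B (Python) =====
-- conflict_mark='、,，。！？!?：:;'
--
-- def remove_multimark(text):
--     # a char (index>=1) is dropped iff it and its predecessor are both conflict marks:
--     # each maximal run of marks collapses to its first mark
--     if not text:
--         return text
--     return text[0] + ''.join(c for p, c in zip(text, text[1:])
--                              if not (p in conflict_mark and c in conflict_mark))
-- ===== Notes on version B (the rewrite author's own statement) =====
-- stated objective: simpler
-- what changed: Replaced the stateful index loop with a skip flag by a stateless pairwise filter over zip(text, text[1:]): a char is kept unless it and its predecessor are both conflict marks.
import Mathlib
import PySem

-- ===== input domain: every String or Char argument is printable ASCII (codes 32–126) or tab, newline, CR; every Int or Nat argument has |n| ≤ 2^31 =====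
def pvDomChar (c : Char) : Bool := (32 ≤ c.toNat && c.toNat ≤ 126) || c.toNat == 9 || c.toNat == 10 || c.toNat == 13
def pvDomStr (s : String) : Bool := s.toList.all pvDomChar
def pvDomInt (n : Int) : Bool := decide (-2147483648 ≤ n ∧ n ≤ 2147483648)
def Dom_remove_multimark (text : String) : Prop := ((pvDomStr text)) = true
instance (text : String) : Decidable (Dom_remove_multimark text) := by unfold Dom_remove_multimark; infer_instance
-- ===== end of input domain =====

-- B replaces A's skip-flag index loop by a stateless pairwise filter (objective: simpler); same values everywhere.

-- ===== PORT A =====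
def pvMarks : List Char := "、,，。！？!?：:;".toList

-- A's loop 'for i in range(len(text)-1)' reads text[i], text[i+1]; transcribed as the
-- fold over the char list carrying the same state (outtext, skip_flag), with the final
-- 'if skip_flag==0: outtext+=text[-1]' in the one-element case.
def pvLoopA : List Char → List Char → Bool → List Char
  | c1 :: c2 :: rest, outtext, skip =>
    if skip then
      pvLoopA (c2 :: rest) outtext (decide (c2 ∈ pvMarks))
    else if c1 ∈ pvMarks ∧ c2 ∈ pvMarks then
      pvLoopA (c2 :: rest) (outtext ++ [c1]) true
    else
      pvLoopA (c2 :: rest) (outtext ++ [c1]) false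
  | [c], outtext, skip => if skip then outtext else outtext ++ [c]
  | [], outtext, _ => outtext

def remove_multimark (text : String) : String :=
  if text = "" ∨ text.toList.length = 1 then text
  else String.ofList (pvLoopA text.toList [] false)

-- ===== PORT B =====
def remove_multimark_alt (text : String) : String :=
  match text.toList with
  | [] => text
  | c :: rest =>
    String.ofList (c :: ((c :: rest).zip rest).filterMap
      (fun p => if p.1 ∈ pvMarks ∧ p.2 ∈ pvMarks then none else some p.2))

-- ===== PRECONDITION & SPEC =====
def Spec_remove_multimark (text : String) (out : String) : Prop := out = remove_multimark_alt text
instance (text : String) (out : String) : Decidable (Spec_remove_multimark text out) := by unfold Spec_remove_multimark; infer_instance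

-- ===== CLAIM (what is proved, stated in full; the proofs are below) =====
def Claim_equal_remove_multimark : Prop := ∀ (text : String), Dom_remove_multimark text → Spec_remove_multimark text (remove_multimark text)

-- ===== LEMMAS AND PROOFS =====

/-- B's kept tail after a character `prev`. -/
def pvKeep (prev : Char) (rest : List Char) : List Char :=
  ((prev :: rest).zip rest).filterMap
    (fun p => if p.1 ∈ pvMarks ∧ p.2 ∈ pvMarks then none else some p.2)

theorem pvKeep_cons (prev d : Char) (rs : List Char) :
    pvKeep prev (d :: rs) =
      (if prev ∈ pvMarks ∧ d ∈ pvMarks then [] else [d]) ++ pvKeep d rs := by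
  simp only [pvKeep, List.zip_cons_cons, List.filterMap_cons]
  split_ifs <;> simp

theorem pvLoopA_false (c d : Char) (rs acc : List Char) :
    pvLoopA (c :: d :: rs) acc false =
      if c ∈ pvMarks ∧ d ∈ pvMarks then pvLoopA (d :: rs) (acc ++ [c]) true
      else pvLoopA (d :: rs) (acc ++ [c]) false := by
  simp [pvLoopA]

theorem pvLoopA_true (c d : Char) (rs acc : List Char) :
    pvLoopA (c :: d :: rs) acc true = pvLoopA (d :: rs) acc (decide (d ∈ pvMarks)) := by
  simp [pvLoopA]

/-- Joint invariant of A's loop: with skip=false it emits the head then B's kept tail;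
    with skip=true (which A only reaches when the head is a mark) it drops the head. -/
theorem pvLoopA_spec (rest : List Char) :
    (∀ (c : Char) (acc : List Char),
        pvLoopA (c :: rest) acc false = acc ++ c :: pvKeep c rest) ∧
    (∀ (d : Char) (acc : List Char), d ∈ pvMarks →
        pvLoopA (d :: rest) acc true = acc ++ pvKeep d rest) := by
  induction rest with
  | nil =>
    constructor
    · intro c acc; simp [pvLoopA, pvKeep]
    · intro d acc _; simp [pvLoopA, pvKeep]
  | cons d rs ih =>
    constructor
    · intro c acc
      rw [pvLoopA_false, pvKeep_cons]
      by_cases h : c ∈ pvMarks ∧ d ∈ pvMarks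
      · rw [if_pos h, if_pos h, ih.2 d _ h.2]; simp
      · rw [if_neg h, if_neg h, ih.1 d _]; simp
    · intro e acc he
      rw [pvLoopA_true, pvKeep_cons]
      by_cases hd : d ∈ pvMarks
      · rw [if_pos (And.intro he hd)]
        simp only [hd, decide_true]
        rw [ih.2 d acc hd]; simp
      · rw [if_neg (fun h => hd h.2)]
        simp only [hd, decide_false]
        rw [ih.1 d acc]; simp

-- ===== VERDICT (by name: the statement is the Claim_ definition above) =====
theorem remove_multimark_spec : Claim_equal_remove_multimark := by
  intro text _
  unfold Spec_remove_multimark remove_multimark remove_multimark_alt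
  match hm : text.toList with
  | [] =>
    have : text = "" := by
      rw [← String.ofList_toList (s := text), hm]
    simp [this]
  | [c] =>
    have : text = String.ofList [c] := by
      rw [← String.ofList_toList (s := text), hm]
    simp [this]
  | c :: d :: rs =>
    rw [if_neg (by
      rintro (h | h)
      · rw [h] at hm; simp at hm
      · simp at h)]
    rw [(pvLoopA_spec (d :: rs)).1 c []]
    rfl
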